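-- pv_equiv track=rewrite | github.com/sqamentor/Hybrid_Automation | framework/intelligence/__init__.py | _extract_keys_from_response
-- ===== SOURCE A (Python) =====
-- from typing import Dict, Any, List, Optional, Tuple
--
-- def _extract_keys_from_response(response: Dict) -> Dict[str, Any]:
--     """Extract potential correlation keys from API response"""
--     keys = {}
--
--     # Common key patterns
--     key_patterns = [
--         'id', 'order_id', 'user_id', 'transaction_id',
--         'request_id', 'customer_id', 'product_id',
--         'invoice_id', 'payment_id', 'session_id'
--     ]
--
--     for key_pattern in key_patterns:
--         if key_pattern in response:
--             keys[key_pattern] = response[key_pattern]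
--
--     return keys
-- ===== SOURCE B (Python) =====
-- _KEY_PATTERNS = (
--     'id', 'order_id', 'user_id', 'transaction_id',
--     'request_id', 'customer_id', 'product_id',
--     'invoice_id', 'payment_id', 'session_id'
-- )
-- _KEY_PATTERN_SET = frozenset(_KEY_PATTERNS)
--
--
-- def _extract_keys_from_response(response):
--     """Extract potential correlation keys from API response."""
--     found = {}
--     for key, value in response.items():
--         if key in _KEY_PATTERN_SET:
--             found.setdefault(key, value)
--     return dict((kp, found[kp]) for kp in _KEY_PATTERNS if kp in found)
-- ===== Notes on version B (the rewrite author's own statement) =====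
-- stated objective: alternative
-- what changed: B flips the traversal: instead of probing the response once per fixed pattern, it makes a single pass over the response items filtering through a frozenset of known patterns, then assembles the result in canonical pattern order.
import Mathlib
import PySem

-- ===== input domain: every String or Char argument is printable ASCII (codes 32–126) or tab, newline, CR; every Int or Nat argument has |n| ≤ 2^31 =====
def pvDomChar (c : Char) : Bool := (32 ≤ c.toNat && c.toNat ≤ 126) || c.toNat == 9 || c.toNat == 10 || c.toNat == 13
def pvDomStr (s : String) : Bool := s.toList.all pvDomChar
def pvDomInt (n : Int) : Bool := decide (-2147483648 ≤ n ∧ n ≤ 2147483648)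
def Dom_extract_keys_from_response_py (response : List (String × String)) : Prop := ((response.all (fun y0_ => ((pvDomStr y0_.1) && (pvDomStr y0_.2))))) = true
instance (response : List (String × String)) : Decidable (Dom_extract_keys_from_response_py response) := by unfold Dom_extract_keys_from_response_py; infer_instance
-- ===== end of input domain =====

-- B replaces A's pattern-by-pattern probing of the response with a single filtering
-- pass over the response items followed by an assembly in canonical pattern order
-- (objective: alternative traversal, same result).

-- ===== PORT A =====
def pvKeyPatterns : List String :=
  ["id", "order_id", "user_id", "transaction_id",
   "request_id", "customer_id", "product_id",
   "invoice_id", "payment_id", "session_id"]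

def extract_keys_from_response_py (response : List (String × String)) : List (String × String) :=
  (pvKeyPatterns.foldl
    (fun (keys : PySem.Dict String String) kp =>
      if (PySem.Dict.mk response).contains kp then
        keys.insert kp (PySem.Dict.getD (PySem.Dict.mk response) kp "")
      else keys)
    PySem.Dict.empty).items

-- ===== PORT B =====
def pvAltPatterns : List String :=
  ["id", "order_id", "user_id", "transaction_id",
   "request_id", "customer_id", "product_id",
   "invoice_id", "payment_id", "session_id"]

def pvAltPatternSet : PySem.Set String := PySem.Set.ofList pvAltPatterns

def extract_keys_from_response_py_alt (response : List (String × String)) : List (String × String) :=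
  -- single pass over the response items, filtering through the pattern set
  let found : PySem.Dict String String :=
    response.foldl
      (fun (f : PySem.Dict String String) kv =>
        if pvAltPatternSet.contains kv.1 then f.setdefault kv.1 kv.2 else f)
      PySem.Dict.empty
  -- dict((kp, found[kp]) for kp in _KEY_PATTERNS if kp in found)
  (PySem.Dict.ofList
    ((pvAltPatterns.filter (fun kp => found.contains kp)).map
      (fun kp => (kp, PySem.Dict.getD found kp "")))).items

-- ===== PRECONDITION & SPEC =====
def Spec_extract_keys_from_response_py (response : List (String × String)) (out : List (String × String)) : Prop := out = extract_keys_from_response_py_alt response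
instance (response : List (String × String)) (out : List (String × String)) : Decidable (Spec_extract_keys_from_response_py response out) := by unfold Spec_extract_keys_from_response_py; infer_instance

-- ===== CLAIM (what is proved, stated in full; the proofs are below) =====
def Claim_equal_extract_keys_from_response_py : Prop := ∀ (response : List (String × String)), Dom_extract_keys_from_response_py response → Spec_extract_keys_from_response_py response (extract_keys_from_response_py response)

-- ===== LEMMAS AND PROOFS =====

theorem pv_contains_eq_isSome {κ ν : Type} [BEq κ] (d : PySem.Dict κ ν) (k : κ) :
    d.contains k = (d.get? k).isSome := by
  rcases d with ⟨items⟩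
  induction items with
  | nil => rfl
  | cons x t ih =>
    by_cases h : (x.1 == k) = true <;>
      simp_all [PySem.Dict.contains, PySem.Dict.get?, List.find?, List.any_cons]

theorem pv_setdefault_get? {κ ν : Type} [BEq κ] [LawfulBEq κ] (f : PySem.Dict κ ν) (a k : κ) (b : ν) :
    (f.setdefault a b).get? k = (f.get? k).or (if a == k then some b else none) := by
  by_cases h : f.contains a = true
  · simp only [PySem.Dict.setdefault, h, if_true]
    by_cases hak : (a == k) = true
    · have hk : a = k := eq_of_beq hak
      subst hk
      have hs : (f.get? a).isSome := by rw [← pv_contains_eq_isSome]; exact h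
      rcases Option.isSome_iff_exists.mp hs with ⟨v, hv⟩
      simp [hv]
    · simp [hak]
  · simp only [PySem.Dict.setdefault, h]
    rcases f with ⟨items⟩
    rcases hf : List.find? (fun p => p.1 == k) items with _ | x <;>
      by_cases hak : (a == k) = true <;>
        simp [PySem.Dict.get?, List.find?_append, hf, List.find?, hak]

-- phase 1 of B: the filtered setdefault-fold looks up like the original response dict
theorem pv_fold1_get? (L : List (String × String)) (f : PySem.Dict String String) (k : String) :
    (L.foldl
      (fun (f : PySem.Dict String String) kv =>
        if pvAltPatternSet.contains kv.1 then f.setdefault kv.1 kv.2 else f) f).get? k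
    = (f.get? k).or
        (if pvAltPatternSet.contains k then (PySem.Dict.mk L).get? k else none) := by
  induction L generalizing f with
  | nil => simp [PySem.Dict.get?]
  | cons ab t ih =>
    obtain ⟨a, b⟩ := ab
    simp only [List.foldl_cons]
    by_cases hpa : pvAltPatternSet.contains a = true
    · rw [if_pos hpa, ih, pv_setdefault_get?, Option.or_assoc]
      congr 1
      rw [PySem.Dict.get?_mk_cons]
      by_cases hak : (a == k) = true
      · have : a = k := eq_of_beq hak
        subst this
        simp only [hak, if_true, hpa, Option.some_or]
      · have hak' : (a == k) = false := by simpa using hak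
        simp only [hak', Bool.false_eq_true, if_false, Option.none_or]
    · rw [if_neg hpa, ih]
      congr 1
      rw [PySem.Dict.get?_mk_cons]
      by_cases hak : (a == k) = true
      · have : a = k := eq_of_beq hak
        subst this
        have hpa' : pvAltPatternSet.contains a = false := by simpa using hpa
        simp only [hpa', Bool.false_eq_true, if_false]
      · have hak' : (a == k) = false := by simpa using hak
        simp only [hak', Bool.false_eq_true, if_false]

-- A's fold over the patterns, with a fresh accumulator, emits exactly the hit patterns in order
theorem pv_fold2_items (g : PySem.Dict String String) (ps : List String)
    (acc : PySem.Dict String String)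
    (hacc : ∀ p ∈ ps, acc.contains p = false) (hnd : ps.Nodup) :
    (ps.foldl
      (fun (keys : PySem.Dict String String) kp =>
        if g.contains kp then keys.insert kp (PySem.Dict.getD g kp "") else keys) acc).items
    = acc.items ++ ps.filterMap (fun kp => (g.get? kp).map (fun v => (kp, v))) := by
  induction ps generalizing acc with
  | nil => simp
  | cons p t ih =>
    have hap : acc.contains p = false := hacc p (List.mem_cons_self)
    have hndt : t.Nodup := hnd.of_cons
    simp only [List.foldl_cons, List.filterMap_cons]
    by_cases hg : g.contains p = true
    · rw [if_pos hg]
      have hsome : (g.get? p).isSome := by rw [← pv_contains_eq_isSome]; exact hg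
      rcases Option.isSome_iff_exists.mp hsome with ⟨v, hv⟩
      have hins : (acc.insert p (PySem.Dict.getD g p "")).items
          = acc.items ++ [(p, v)] := by
        simp [PySem.Dict.insert, hap, PySem.Dict.getD, hv]
      have hacc' : ∀ q ∈ t, (acc.insert p (PySem.Dict.getD g p "")).contains q = false := by
        intro q hq
        have hpq : ¬ p = q := fun h => (List.nodup_cons.mp hnd).1 (h ▸ hq)
        have : (acc.insert p (PySem.Dict.getD g p "")).get? q = acc.get? q :=
          PySem.Dict.get?_insert_of_ne acc _ (fun h => hpq h.symm)
        rw [pv_contains_eq_isSome, this, ← pv_contains_eq_isSome]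
        exact hacc q (List.mem_cons_of_mem _ hq)
      rw [ih _ hacc' hndt, hins, hv]
      simp
    · rw [if_neg hg]
      have hnone : g.get? p = none := by
        rcases h : g.get? p with _ | v
        · rfl
        · exact absurd (by rw [pv_contains_eq_isSome, h]; rfl) hg
      rw [ih _ (fun q hq => hacc q (List.mem_cons_of_mem _ hq)) hndt, hnone]
      simp

theorem pv_patterns_in_set : ∀ kp ∈ pvAltPatterns, pvAltPatternSet.contains kp = true := by
  decide

theorem pv_patterns_nodup : pvKeyPatterns.Nodup := by decide

theorem pv_update_items : ∀ (ps : List (String × String)) (d : PySem.Dict String String),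
    (ps.map Prod.fst).Nodup → (∀ p ∈ ps, d.contains p.1 = false) →
    (d.update ps).items = d.items ++ ps := by
  intro ps
  induction ps with
  | nil => intro d _ _; simp [PySem.Dict.update]
  | cons q t ih =>
    intro d hnd hd
    have hnd' : q.1 ∉ t.map Prod.fst ∧ (t.map Prod.fst).Nodup := by
      rw [List.map_cons] at hnd
      exact List.nodup_cons.mp hnd
    have hq : d.contains q.1 = false := hd q (List.mem_cons_self)
    have hins : (d.insert q.1 q.2).items = d.items ++ [q] := by
      simp [PySem.Dict.insert, hq]
    have hd' : ∀ p ∈ t, (d.insert q.1 q.2).contains p.1 = false := by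
      intro p hp
      have hne : ¬ q.1 = p.1 := fun h => hnd'.1 (h ▸ List.mem_map_of_mem hp)
      have : (d.insert q.1 q.2).get? p.1 = d.get? p.1 :=
        PySem.Dict.get?_insert_of_ne d _ (fun h => hne h.symm)
      rw [pv_contains_eq_isSome, this, ← pv_contains_eq_isSome]
      exact hd p (List.mem_cons_of_mem _ hp)
    have hrec := ih (d.insert q.1 q.2) hnd'.2 hd'
    simp only [PySem.Dict.update, List.foldl_cons] at *
    rw [hrec, hins, List.append_assoc]
    rfl

-- ofList of a list with pairwise-distinct keys keeps the items list unchanged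
theorem pv_ofList_items (ps : List (String × String))
    (hnd : (ps.map Prod.fst).Nodup) : (PySem.Dict.ofList ps).items = ps := by
  simpa using pv_update_items ps PySem.Dict.empty hnd (fun p _ => rfl)

-- ===== VERDICT (by name: the statement is the Claim_ definition above) =====
theorem extract_keys_from_response_py_spec : Claim_equal_extract_keys_from_response_py := by
  intro response _
  unfold Spec_extract_keys_from_response_py
  unfold extract_keys_from_response_py extract_keys_from_response_py_alt
  set found : PySem.Dict String String :=
    response.foldl
      (fun (f : PySem.Dict String String) kv =>
        if pvAltPatternSet.contains kv.1 then f.setdefault kv.1 kv.2 else f)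
      PySem.Dict.empty with hfound
  have hpat : pvKeyPatterns = pvAltPatterns := rfl
  -- A's fold emits the hit patterns in pattern order
  have hA := pv_fold2_items (PySem.Dict.mk response) pvKeyPatterns PySem.Dict.empty
    (fun p _ => rfl) pv_patterns_nodup
  -- B's found dict looks up exactly like the response, on pattern keys
  have hlook : ∀ kp ∈ pvAltPatterns, found.get? kp = (PySem.Dict.mk response).get? kp := by
    intro kp hkp
    rw [hfound, pv_fold1_get? response PySem.Dict.empty kp,
        if_pos (pv_patterns_in_set kp hkp)]
    rfl
  -- B's filtered-key list has distinct keys, so ofList keeps it unchanged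
  have hndM : (((pvAltPatterns.filter (fun kp => found.contains kp)).map
      (fun kp => (kp, PySem.Dict.getD found kp ""))).map Prod.fst).Nodup := by
    have : ((pvAltPatterns.filter (fun kp => found.contains kp)).map
        (fun kp => (kp, PySem.Dict.getD found kp ""))).map Prod.fst
        = pvAltPatterns.filter (fun kp => found.contains kp) := by
      simp [Function.comp_def]
    rw [this]
    exact (hpat ▸ pv_patterns_nodup).filter _
  rw [hA, pv_ofList_items _ hndM]
  -- turn B's filter+map into the same filterMap and compare pointwise
  rw [← List.filterMap_eq_map, List.filterMap_filter]
  simp only [PySem.Dict.empty, List.nil_append, hpat]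
  refine List.filterMap_congr ?_
  intro kp hkp
  have hl := hlook kp hkp
  rcases hr : (PySem.Dict.mk response).get? kp with _ | v
  · have : found.contains kp = false := by
      rw [pv_contains_eq_isSome, hl, hr]; rfl
    simp [this]
  · have hc : found.contains kp = true := by
      rw [pv_contains_eq_isSome, hl, hr]; rfl
    simp [hc, PySem.Dict.getD, hl, hr]
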